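-- pv_equiv track=rewrite | github.com/kennygnw/poker_detection_endterm | funcs.py | get_dict_key_with_highest_counter
-- ===== SOURCE A (Python) =====
-- def get_dict_key_with_highest_counter(tracker_dict: dict) -> list:
--     result_buffer_dict = dict()
--     for key, value in tracker_dict.items():
--         # Split the key into pixel and data parts
--         parts = key.split(', ')
--         pixel = ', '.join(parts[:2])  # Extract the pixel part (first two parts)
--         # Check if the pixel is already in the result or update if the value is higher
--         if pixel not in result_buffer_dict or value > tracker_dict[result_buffer_dict[pixel]]:
--             result_buffer_dict[pixel] = key
--     final_result = [key for key in result_buffer_dict.values()]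
--     return final_result
-- ===== SOURCE B (Python) =====
-- def get_dict_key_with_highest_counter(tracker_dict: dict) -> list:
--     # Group keys by pixel prefix, then take the first-max key of each group.
--     groups = dict()
--     for key in tracker_dict:
--         pixel = ', '.join(key.split(', ')[:2])
--         groups.setdefault(pixel, []).append(key)
--     return [max(ks, key=lambda k: tracker_dict[k]) for ks in groups.values()]
-- ===== Notes on version B (the rewrite author's own statement) =====
-- stated objective: simpler
-- what changed: A maintains a running best key per pixel prefix with an inline compare-and-overwrite inside one loop; B first groups all keys by pixel prefix into lists and then takes max(keys, key=...) (first maximal, like A's strict '>') of each group.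
import Mathlib
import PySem

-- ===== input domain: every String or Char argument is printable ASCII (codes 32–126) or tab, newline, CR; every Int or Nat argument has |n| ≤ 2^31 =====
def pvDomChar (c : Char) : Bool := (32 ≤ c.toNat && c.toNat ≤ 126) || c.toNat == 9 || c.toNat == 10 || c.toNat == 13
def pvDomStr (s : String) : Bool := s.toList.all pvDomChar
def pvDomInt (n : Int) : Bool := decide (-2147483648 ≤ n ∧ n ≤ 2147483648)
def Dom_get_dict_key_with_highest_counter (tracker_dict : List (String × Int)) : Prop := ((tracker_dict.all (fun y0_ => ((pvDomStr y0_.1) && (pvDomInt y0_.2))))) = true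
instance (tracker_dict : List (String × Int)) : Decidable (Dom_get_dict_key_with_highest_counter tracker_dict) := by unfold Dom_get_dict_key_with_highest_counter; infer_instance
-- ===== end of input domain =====

-- B replaces A's inline running-best update with an explicit group-then-reduce (collect keys per pixel prefix, then first-max of each group); objective: simpler decomposition.

-- shared helper: pixel = ', '.join(key.split(', ')[:2])  (the identical line occurs in both Pythons)
def pvPixel (s : String) : String :=
  PySem.Str.join ", " (PySem.List.slice ((PySem.Str.split? s ", ").getD []) none (some 2))

-- ===== PORT A =====
-- one iteration of A's loop; the getD defaults are unreachable (Python short-circuits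
-- 'pixel not in result_buffer_dict or …', and stored keys always occur in tracker_dict)
def pvStepA (tdD : PySem.Dict String Int) (buf : PySem.Dict String String) (kv : String × Int) : PySem.Dict String String :=
  let pixel := pvPixel kv.1
  if buf.contains pixel = false ∨ tdD.getD (buf.getD pixel "") 0 < kv.2 then
    buf.insert pixel kv.1
  else buf

def get_dict_key_with_highest_counter (tracker_dict : List (String × Int)) : List String :=
  let tdD := PySem.Dict.mk tracker_dict
  (tracker_dict.foldl (pvStepA tdD) PySem.Dict.empty).values

-- ===== PORT B =====
-- groups.setdefault(pixel, []).append(key)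
def pvStepB (g : PySem.Dict String (List String)) (kv : String × Int) : PySem.Dict String (List String) :=
  g.modify (pvPixel kv.1) [] (· ++ [kv.1])

-- max(ks, key=lambda k: tracker_dict[k]); group lists are nonempty, so the getD "" is unreachable
def pvMaxKey (tdD : PySem.Dict String Int) (ks : List String) : String :=
  (PySem.List.max? ks (fun k => tdD.getD k 0)).getD ""

def get_dict_key_with_highest_counter_alt (tracker_dict : List (String × Int)) : List String :=
  let tdD := PySem.Dict.mk tracker_dict
  ((tracker_dict.foldl pvStepB PySem.Dict.empty).values).map (pvMaxKey tdD)

-- ===== PRECONDITION & SPEC =====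
-- Pre_ excludes association lists with duplicate keys: a Python dict cannot contain a key twice,
-- so such lists represent no actual input of A, and A's first-match lookup makes its value there accidental.
def Pre_get_dict_key_with_highest_counter (tracker_dict : List (String × Int)) : Prop :=
  (tracker_dict.map Prod.fst).Nodup
instance (tracker_dict : List (String × Int)) : Decidable (Pre_get_dict_key_with_highest_counter tracker_dict) := by unfold Pre_get_dict_key_with_highest_counter; infer_instance

def pvWitness_get_dict_key_with_highest_counter : (List (String × Int)) :=
  [("0, 0, ace", 2), ("0, 0, king", 5), ("3, 4, two", 1)]

def Spec_get_dict_key_with_highest_counter (tracker_dict : List (String × Int)) (out : List String) : Prop := out = get_dict_key_with_highest_counter_alt tracker_dict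
instance (tracker_dict : List (String × Int)) (out : List String) : Decidable (Spec_get_dict_key_with_highest_counter tracker_dict out) := by unfold Spec_get_dict_key_with_highest_counter; infer_instance

-- ===== CLAIM (what is proved, stated in full; the proofs are below) =====
def Claim_equal_get_dict_key_with_highest_counter : Prop := ∀ (tracker_dict : List (String × Int)), Dom_get_dict_key_with_highest_counter tracker_dict → Pre_get_dict_key_with_highest_counter tracker_dict → Spec_get_dict_key_with_highest_counter tracker_dict (get_dict_key_with_highest_counter tracker_dict)

-- ===== LEMMAS AND PROOFS =====

lemma pv_max?_append_some (ks : List String) (k m : String) (key : String → Int)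
    (h : PySem.List.max? ks key = some m) :
    PySem.List.max? (ks ++ [k]) key = if key m < key k then some k else some m := by
  simp only [PySem.List.max?] at h ⊢
  rw [List.foldl_append, h]
  rfl

-- the loop invariant: A's buffer has the same pixels (in the same order) as B's group dict,
-- and at each pixel A's stored key is the first max of B's collected group
lemma pv_loop_values (tdD : PySem.Dict String Int) (l : List (String × Int))
    (hl : ∀ p ∈ l, tdD.getD p.1 0 = p.2)
    (buf : PySem.Dict String String) (g : PySem.Dict String (List String))
    (hkeys : buf.keys = g.keys) (hnd : buf.keys.Nodup)
    (hpt : ∀ p ∈ buf.keys, PySem.List.max? (g.getD p []) (fun k => tdD.getD k 0) = some (buf.getD p "")) :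
    (l.foldl (pvStepA tdD) buf).values = ((l.foldl pvStepB g).values).map (pvMaxKey tdD) := by
  induction l generalizing buf g with
  | nil =>
    simp only [List.foldl_nil]
    rw [PySem.Dict.values_eq_map_keys buf hnd "", PySem.Dict.values_eq_map_keys g (hkeys ▸ hnd) [],
      ← hkeys, List.map_map]
    refine List.map_congr_left (fun p hp => ?_)
    simp only [Function.comp, pvMaxKey, hpt p hp, Option.getD_some]
  | cons a l ih =>
    obtain ⟨k, v⟩ := a
    have hv : tdD.getD k 0 = v := hl (k, v) (by simp)
    have hB : ∀ g' : PySem.Dict String (List String),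
        pvStepB g' (k, v) = g'.modify (pvPixel k) [] (· ++ [k]) := fun _ => rfl
    have hl' : ∀ p ∈ l, tdD.getD p.1 0 = p.2 := fun p hp => hl p (by simp [hp])
    simp only [List.foldl_cons]
    by_cases hmem : pvPixel k ∈ buf.keys
    · have hc : buf.contains (pvPixel k) = true := by
        rw [PySem.Dict.contains_eq_decide_mem_keys]; exact decide_eq_true hmem
      have hcg : g.contains (pvPixel k) = true := by
        rw [PySem.Dict.contains_eq_decide_mem_keys, ← hkeys]; exact decide_eq_true hmem
      have hkeysB : (pvStepB g (k, v)).keys = g.keys := by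
        rw [hB, PySem.Dict.keys_modify, PySem.Dict.keys_insert_of_contains g _ hcg]
      have hM := hpt (pvPixel k) hmem
      by_cases hlt : tdD.getD (buf.getD (pvPixel k) "") 0 < v
      · -- A overwrites; the appended key is the new first max
        have hstep : pvStepA tdD buf (k, v) = buf.insert (pvPixel k) k := by
          simp [pvStepA, hc, hlt]
        rw [hstep]
        refine ih hl' _ _ (by rw [PySem.Dict.keys_insert_of_contains buf _ hc, hkeys, hkeysB])
          (by rw [PySem.Dict.keys_insert_of_contains buf _ hc]; exact hnd) (fun p hp => ?_)
        rw [PySem.Dict.keys_insert_of_contains buf _ hc] at hp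
        rw [hB, PySem.Dict.getD_modify, PySem.Dict.getD_insert]
        by_cases hpe : p = pvPixel k
        · rw [if_pos hpe, if_pos hpe, pv_max?_append_some _ _ _ _ hM,
            if_pos (by simpa [hv] using hlt)]
        · rw [if_neg hpe, if_neg hpe]
          exact hpt p hp
      · -- A keeps its key; appending a not-greater key keeps the first max
        have hstep : pvStepA tdD buf (k, v) = buf := by
          simp [pvStepA, hc, hlt]
        rw [hstep]
        refine ih hl' _ _ (by rw [hkeys, hkeysB]) hnd (fun p hp => ?_)
        rw [hB, PySem.Dict.getD_modify]
        by_cases hpe : p = pvPixel k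
        · rw [if_pos hpe, pv_max?_append_some _ _ _ _ hM,
            if_neg (by simpa [hv] using hlt), hpe]
        · rw [if_neg hpe]
          exact hpt p hp
    · -- new pixel: both sides append it
      have hc : buf.contains (pvPixel k) = false := by
        rw [PySem.Dict.contains_eq_decide_mem_keys]; exact decide_eq_false hmem
      have hcg : g.contains (pvPixel k) = false := by
        rw [PySem.Dict.contains_eq_decide_mem_keys, ← hkeys]; exact decide_eq_false hmem
      have hstep : pvStepA tdD buf (k, v) = buf.insert (pvPixel k) k := by
        simp [pvStepA, hc]
      have hkeysB : (pvStepB g (k, v)).keys = g.keys ++ [pvPixel k] := by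
        rw [hB, PySem.Dict.keys_modify, PySem.Dict.keys_insert_of_not_contains g _ hcg]
      rw [hstep]
      refine ih hl' _ _
        (by rw [PySem.Dict.keys_insert_of_not_contains buf _ hc, hkeys, hkeysB])
        (by rw [PySem.Dict.keys_insert_of_not_contains buf _ hc]
            exact List.Nodup.append hnd (List.nodup_singleton _)
              (by simpa using fun h => hmem h)) (fun p hp => ?_)
      rw [PySem.Dict.keys_insert_of_not_contains buf _ hc] at hp
      rw [hB, PySem.Dict.getD_modify, PySem.Dict.getD_insert]
      by_cases hpe : p = pvPixel k
      · rw [if_pos hpe, if_pos hpe, PySem.Dict.getD_of_not_contains g [] hcg,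
          List.nil_append]
        simp [PySem.List.max?]
      · rw [if_neg hpe, if_neg hpe]
        rcases List.mem_append.mp hp with hp' | hp'
        · exact hpt p hp'
        · exact absurd (List.mem_singleton.mp hp') hpe

-- ===== VERDICT (by name: the statement is the Claim_ definition above) =====
theorem get_dict_key_with_highest_counter_spec : Claim_equal_get_dict_key_with_highest_counter := by
  intro td _ hpre
  unfold Spec_get_dict_key_with_highest_counter
  unfold get_dict_key_with_highest_counter get_dict_key_with_highest_counter_alt
  simp only []
  refine (pv_loop_values (PySem.Dict.mk td) td (fun p hp => ?_) PySem.Dict.empty PySem.Dict.empty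
    rfl PySem.Dict.nodup_keys_empty (by rw [PySem.Dict.keys_empty]; simp))
  exact PySem.Dict.getD_of_mem_items (PySem.Dict.mk td) (by exact hp) (by simpa [PySem.Dict.keys] using hpre) 0
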